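-- pv_equiv track=rewrite | github.com/mdbruffey/adventofcode | 2020/Day-6/Custom_Customs.py | get_families
-- ===== SOURCE A (Python) =====
-- def get_families(data):
--     families = []
--     string = ""
--     for line in data:
--         if line == "\n":
--             families.append(set(string))
--             string = ""
--         else:
--             string += line.strip('\n')
--
--     families.append(set(string))
--     return families
-- ===== SOURCE B (Python) =====
-- def get_families(data):
--     # Divide and conquer on the first separator line: split off the first group, recurse on the rest.
--     if "\n" not in data:
--         return [set("".join(line.strip("\n") for line in data))]
--     i = data.index("\n")
--     return [set("".join(line.strip("\n") for line in data[:i]))] + get_families(data[i+1:])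
-- ===== Notes on version B (the rewrite author's own statement) =====
-- stated objective: alternative
-- what changed: Replaces A's single iterative pass with a running string accumulator by a divide-and-conquer recursion: locate the first separator line, turn the prefix into one set, and recurse on the suffix.
import Mathlib
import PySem

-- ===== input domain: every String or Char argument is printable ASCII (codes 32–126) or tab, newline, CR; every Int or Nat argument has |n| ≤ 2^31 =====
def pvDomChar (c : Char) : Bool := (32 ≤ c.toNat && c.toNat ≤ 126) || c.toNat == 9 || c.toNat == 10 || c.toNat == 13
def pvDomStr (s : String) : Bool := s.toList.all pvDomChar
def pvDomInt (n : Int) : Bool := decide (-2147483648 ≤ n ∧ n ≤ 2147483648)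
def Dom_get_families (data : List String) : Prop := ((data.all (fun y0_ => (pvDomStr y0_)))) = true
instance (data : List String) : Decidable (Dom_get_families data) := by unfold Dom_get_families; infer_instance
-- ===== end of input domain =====

-- B replaces A's single iterative pass with a string accumulator by a divide-and-conquer
-- recursion on the first separator line: an alternative decomposition of the same cost.


-- set(s) for a Python string s: the set of its 1-char strings (shared primitive of both ports)
def pyCharSet (s : List Char) : List String :=
  PySem.Set.ofList (s.map (fun c => String.ofList [c]))

-- ===== PORT A =====
-- state = (families, string); emit set(string) at each "\n", append stripped line otherwise
def get_families (data : List String) : List (List String) :=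
  let st := data.foldl
    (fun (acc : List (List String) × List Char) line =>
      if line = "\n" then (acc.1 ++ [pyCharSet acc.2], [])
      else (acc.1, acc.2 ++ (PySem.Str.stripChars line "\n").toList))
    ([], [])
  st.1 ++ [pyCharSet st.2]

-- ===== PORT B =====
-- set("".join(line.strip("\n") for line in g))
def pvGroupSet (g : List String) : List String :=
  pyCharSet (g.flatMap (fun line => (PySem.Str.stripChars line "\n").toList))

-- if "\n" not in data: one group; else split at data.index("\n") (slices of nonnegative
-- in-range indices: data[:i] = take i, data[i+1:] = drop (i+1)) and recurse on the suffix
def get_families_alt (data : List String) : List (List String) :=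
  if h : "\n" ∈ data then
    pvGroupSet (data.take (data.idxOf "\n")) :: get_families_alt (data.drop (data.idxOf "\n" + 1))
  else
    [pvGroupSet data]
termination_by data.length
decreasing_by
  have : data ≠ [] := by rintro rfl; simp at h
  simp only [List.length_drop]
  have : 0 < data.length := List.length_pos_iff.mpr this
  omega

-- ===== PRECONDITION & SPEC =====
def Spec_get_families (data : List String) (out : List (List String)) : Prop := out = get_families_alt data
instance (data : List String) (out : List (List String)) : Decidable (Spec_get_families data out) := by unfold Spec_get_families; infer_instance

-- ===== CLAIM (what is proved, stated in full; the proofs are below) =====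
def Claim_equal_get_families : Prop := ∀ (data : List String), Dom_get_families data → Spec_get_families data (get_families data)

-- ===== LEMMAS AND PROOFS =====

-- A's loop body, named for the lemmas
def pvStep (acc : List (List String) × List Char) (line : String) : List (List String) × List Char :=
  if line = "\n" then (acc.1 ++ [pyCharSet acc.2], [])
  else (acc.1, acc.2 ++ (PySem.Str.stripChars line "\n").toList)

lemma get_families_eq (data : List String) :
    get_families data
      = (data.foldl pvStep ([], [])).1 ++ [pyCharSet (data.foldl pvStep ([], [])).2] := rfl

-- running A's loop over a separator-free block just extends the string accumulator
lemma pv_foldl_no_sep (data : List String) (h : "\n" ∉ data)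
    (fams : List (List String)) (s : List Char) :
    data.foldl pvStep (fams, s)
      = (fams, s ++ data.flatMap (fun line => (PySem.Str.stripChars line "\n").toList)) := by
  induction data generalizing s with
  | nil => simp
  | cons a tl ih =>
    have ha : a ≠ "\n" := fun hq => h (hq ▸ List.mem_cons_self)
    simp only [List.foldl_cons, pvStep, if_neg ha]
    rw [ih (fun hm => h (List.mem_cons_of_mem _ hm))]
    simp

-- the families list already emitted is just carried along by the loop
lemma pv_foldl_fams (data : List String) (fams : List (List String)) (s : List Char) :
    data.foldl pvStep (fams, s)
      = (fams ++ (data.foldl pvStep ([], s)).1, (data.foldl pvStep ([], s)).2) := by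
  induction data generalizing fams s with
  | nil => simp
  | cons a tl ih =>
    by_cases ha : a = "\n"
    · simp only [List.foldl_cons, pvStep, ha, reduceIte]
      rw [ih (fams ++ [pyCharSet s]) []]
      simp only [List.nil_append]
      rw [ih [pyCharSet s] []]
      simp
    · simp only [List.foldl_cons, pvStep, if_neg ha]
      exact ih fams _

-- splitting a list at the first occurrence of x
lemma pv_split_idxOf (x : String) (l : List String) (h : x ∈ l) :
    l = l.take (l.idxOf x) ++ x :: l.drop (l.idxOf x + 1) ∧ x ∉ l.take (l.idxOf x) := by
  induction l with
  | nil => cases h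
  | cons a tl ih =>
    by_cases ha : a = x
    · subst ha; simp [List.idxOf_cons_self]
    · have hm : x ∈ tl := by
        rcases List.mem_cons.mp h with h1 | h1
        · exact absurd h1.symm ha
        · exact h1
      have hne : ¬ (a == x) = true := by simpa using ha
      obtain ⟨h1, h2⟩ := ih hm
      constructor
      · simp only [List.idxOf_cons, hne, cond_false]
        simpa using h1
      · simp only [List.idxOf_cons, hne, cond_false, List.take_succ_cons, List.mem_cons]
        rintro (h3 | h3)
        · exact ha h3.symm
        · exact h2 h3

-- main equivalence, by strong induction on the length of data
lemma pv_main (n : Nat) : ∀ (data : List String), data.length ≤ n →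
    get_families data = get_families_alt data := by
  induction n with
  | zero =>
    intro data hlen
    have : data = [] := List.eq_nil_of_length_eq_zero (Nat.le_zero.mp hlen)
    subst this
    simp [get_families, get_families_alt, pvGroupSet, pyCharSet]
  | succ n ih =>
    intro data hlen
    by_cases h : "\n" ∈ data
    · obtain ⟨hsplit, hnot⟩ := pv_split_idxOf "\n" data h
      set i := data.idxOf "\n" with hi
      set head := data.take i with hh
      set tl := data.drop (i + 1) with ht
      have hlt : tl.length < data.length := by
        have hpos : data ≠ [] := by rintro rfl; cases h
        have : 0 < data.length := List.length_pos_iff.mpr hpos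
        simp only [ht, List.length_drop]; omega
      have hA : get_families data
          = pvGroupSet head :: get_families tl := by
        rw [get_families_eq data, get_families_eq tl]
        conv_lhs => rw [hsplit]
        rw [List.foldl_append, pv_foldl_no_sep head hnot [] []]
        simp only [List.foldl_cons, pvStep, reduceIte, List.nil_append]
        rw [pv_foldl_fams tl [pyCharSet (head.flatMap (fun line => (PySem.Str.stripChars line "\n").toList))] []]
        simp only [pvGroupSet, List.cons_append, List.nil_append]
      have hB : get_families_alt data
          = pvGroupSet head :: get_families_alt tl := by
        rw [get_families_alt]; simp [h, ← hi, ← hh, ← ht]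
      rw [hA, hB, ih tl (by omega)]
    · have hA : get_families data = [pvGroupSet data] := by
        rw [get_families_eq data, pv_foldl_no_sep data h [] []]
        simp [pvGroupSet]
      rw [hA, get_families_alt]
      simp [h]

-- ===== VERDICT (by name: the statement is the Claim_ definition above) =====
theorem get_families_spec : Claim_equal_get_families := by
  intro data _
  unfold Spec_get_families
  exact pv_main data.length data (le_refl _)
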